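-- pv_equiv track=rewrite | github.com/Unagi-zoso/five-golds-in-a-day | out/production/five-golds-in-a-day/leet-1937.py | maxPoints
-- ===== SOURCE A (Python) =====
-- from typing import List
--
-- def maxPoints(points: List[List[int]]) -> int:
--     m, n = len(points), len(points[0])
--
--     prev = points[0]
--     for i in range(1, m):
--         left = [prev[0]] + [0] * (n - 1)
--         for j in range(1, n):
--             left[j] = max(left[j - 1] - 1, prev[j])
--
--         right = [0] * (n - 1) + [prev[n - 1]]
--         for j in range(n - 2, -1, -1):
--             right[j] = max(right[j + 1] - 1, prev[j])
--
--         cur = []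
--         for j in range(n):
--             cur.append(max(left[j], right[j]) + points[i][j])
--         prev = cur
--
--     return max(prev)
-- ===== SOURCE B (Python) =====
-- def maxPoints(points):
--     n = len(points[0])
--     prev = points[0]
--     for row in points[1:]:
--         prev = [row[j] + max(prev[k] - abs(j - k) for k in range(n)) for j in range(n)]
--     return max(prev)
-- ===== Notes on version B (the rewrite author's own statement) =====
-- stated objective: simpler
-- what changed: Replaces the left/right decay-array passes and the combining loop with a single naive DP transition: for each cell, one inner scan over all previous-row columns taking max(prev[k] - |j-k|).
import Mathlib
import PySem

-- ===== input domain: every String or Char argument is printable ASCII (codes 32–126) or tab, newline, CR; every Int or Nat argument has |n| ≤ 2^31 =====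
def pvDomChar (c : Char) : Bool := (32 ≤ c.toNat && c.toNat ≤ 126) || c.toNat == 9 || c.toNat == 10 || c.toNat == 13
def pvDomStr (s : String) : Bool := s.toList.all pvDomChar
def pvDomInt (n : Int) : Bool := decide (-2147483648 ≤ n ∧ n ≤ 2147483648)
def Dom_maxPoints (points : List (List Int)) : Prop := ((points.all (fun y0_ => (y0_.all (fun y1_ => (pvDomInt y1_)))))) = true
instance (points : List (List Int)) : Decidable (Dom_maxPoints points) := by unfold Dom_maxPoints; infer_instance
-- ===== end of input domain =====

-- B replaces A's left/right decay-array passes by a single naive inner scan per cell (simpler, not faster).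

-- ===== PORT A =====
-- All list indices below are nonnegative and in range under Pre_maxPoints, so List.getD is
-- exact for Python's xs[j] there.

-- left[0] = prev[0]; for j in range(1, n): left[j] = max(left[j-1] - 1, prev[j])
def leftFrom (cur : Int) : List Int → List Int
  | [] => []
  | p :: rest =>
      let v := max (cur - 1) p
      v :: leftFrom v rest

def leftList (prev : List Int) : List Int :=
  let p0 := prev.getD 0 0
  p0 :: leftFrom p0 (prev.drop 1)

-- right[n-1] = prev[n-1]; for j in range(n-2, -1, -1): right[j] = max(right[j+1] - 1, prev[j])
def rightList : List Int → List Int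
  | [] => []
  | [p] => [p]
  | p :: q :: rest =>
      let r := rightList (q :: rest)
      max (r.headD 0 - 1) p :: r

-- cur = []; for j in range(n): cur.append(max(left[j], right[j]) + points[i][j])
def stepA (n : Nat) (prev row : List Int) : List Int :=
  let left := leftList prev
  let right := rightList prev
  (List.range n).map (fun j => max (left.getD j 0) (right.getD j 0) + row.getD j 0)

def maxPoints (points : List (List Int)) : Int :=
  let n := (points.headD []).length
  let prev := (points.drop 1).foldl (stepA n) (points.headD [])
  (PySem.List.max? prev (fun x => x)).getD 0

-- ===== PORT B =====
-- max(prev[k] - abs(j - k) for k in range(n))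
def innerBest (prev : List Int) (n j : Nat) : Int :=
  let vals := (List.range n).map (fun k => prev.getD k 0 - |(j : Int) - (k : Int)|)
  (PySem.List.max? vals (fun x => x)).getD 0

-- [row[j] + max(prev[k] - abs(j - k) for k in range(n)) for j in range(n)]
def stepB (n : Nat) (prev row : List Int) : List Int :=
  (List.range n).map (fun j => row.getD j 0 + innerBest prev n j)

def maxPoints_alt (points : List (List Int)) : Int :=
  let n := (points.headD []).length
  let prev := (points.drop 1).foldl (stepB n) (points.headD [])
  (PySem.List.max? prev (fun x => x)).getD 0

-- ===== PRECONDITION & SPEC =====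
-- Pre_ excludes exactly the inputs where Python A raises: an empty grid (points[0] IndexError),
-- an empty first row (max() of an empty list / prev[0] IndexError), and a row shorter than the
-- first row (IndexError on points[i][j]).
def Pre_maxPoints (points : List (List Int)) : Prop :=
  points ≠ [] ∧ 0 < (points.headD []).length ∧
    ∀ row ∈ points, (points.headD []).length ≤ row.length
instance (points : List (List Int)) : Decidable (Pre_maxPoints points) := by
  unfold Pre_maxPoints; infer_instance

def pvWitness_maxPoints : List (List Int) := [[1, 2, 3], [1, 5, 1], [3, 1, 1]]

def Spec_maxPoints (points : List (List Int)) (out : Int) : Prop := out = maxPoints_alt points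
instance (points : List (List Int)) (out : Int) : Decidable (Spec_maxPoints points out) := by unfold Spec_maxPoints; infer_instance

-- ===== CLAIM (what is proved, stated in full; the proofs are below) =====
def Claim_equal_maxPoints : Prop := ∀ (points : List (List Int)), Dom_maxPoints points → Pre_maxPoints points → Spec_maxPoints points (maxPoints points)

-- ===== LEMMAS AND PROOFS =====

-- max of a nonempty list of ints, the way Python's max() runs
def myMax : List Int → Int
  | [] => 0
  | x :: xs => xs.foldl max x

theorem foldl_max_max (xs : List Int) : ∀ a b : Int,
    xs.foldl max (max a b) = max a (xs.foldl max b) := by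
  induction xs with
  | nil => intro a b; simp
  | cons x xs ih =>
      intro a b
      simp only [List.foldl_cons]
      rw [max_assoc, ih]

theorem foldl_max_eq (a : Int) (xs : List Int) (h : xs ≠ []) :
    xs.foldl max a = max a (myMax xs) := by
  cases xs with
  | nil => exact absurd rfl h
  | cons y ys => simp only [List.foldl_cons, myMax]; rw [foldl_max_max]

theorem myMax_cons (x : Int) (xs : List Int) (h : xs ≠ []) :
    myMax (x :: xs) = max x (myMax xs) := by
  simp only [myMax]; exact foldl_max_eq x xs h

theorem myMax_append (xs ys : List Int) (hx : xs ≠ []) (hy : ys ≠ []) :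
    myMax (xs ++ ys) = max (myMax xs) (myMax ys) := by
  cases xs with
  | nil => exact absurd rfl hx
  | cons x xs' =>
      simp only [myMax, List.cons_append, List.foldl_append]
      exact foldl_max_eq _ ys hy

theorem foldl_max_sub_one : ∀ (xs : List Int) (a : Int),
    (xs.map (fun x => x - 1)).foldl max (a - 1) = xs.foldl max a - 1 := by
  intro xs
  induction xs with
  | nil => intro a; simp
  | cons x xs ih =>
      intro a
      simp only [List.map_cons, List.foldl_cons]
      have h : max (a - 1) (x - 1) = max a x - 1 := by omega
      rw [h, ih]

theorem myMax_map_sub_one (l : List Int) (h : l ≠ []) :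
    myMax (l.map (fun x => x - 1)) = myMax l - 1 := by
  cases l with
  | nil => exact absurd rfl h
  | cons x xs =>
      simp only [List.map_cons, myMax]
      exact foldl_max_sub_one xs x

theorem le_foldl_max_init (xs : List Int) : ∀ a : Int, a ≤ xs.foldl max a := by
  induction xs with
  | nil => intro a; simp
  | cons x xs ih =>
      intro a
      simp only [List.foldl_cons]
      exact le_trans (le_max_left a x) (ih _)

theorem le_myMax_of_mem {x : Int} {l : List Int} (h : x ∈ l) : x ≤ myMax l := by
  cases l with
  | nil => simp at h
  | cons y ys =>
      simp only [myMax]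
      rcases List.mem_cons.mp h with h' | h'
      · subst h'; exact le_foldl_max_init ys x
      · clear h
        induction ys generalizing y with
        | nil => simp at h'
        | cons z zs ih =>
            simp only [List.foldl_cons]
            rcases List.mem_cons.mp h' with h'' | h''
            · subst h''; exact le_trans (le_max_right y x) (le_foldl_max_init zs _)
            · exact ih _ h''

theorem max?_getD_eq_myMax (l : List Int) :
    (PySem.List.max? l (fun x => x)).getD 0 = myMax l := by
  cases l with
  | nil => simp [PySem.List.max?, myMax]
  | cons x xs => rw [PySem.List.max?_id_cons]; rfl

-- characterisation of A's left pass: running max of prev[k] - (j - k) over k ≤ j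
def LspecF (prev : List Int) (j : Nat) : List Int :=
  (List.range (j + 1)).map (fun k => prev.getD k 0 - ((j : Int) - (k : Int)))

theorem LspecF_ne_nil (prev : List Int) (j : Nat) : LspecF prev j ≠ [] := by
  simp [LspecF]

theorem leftFrom_getD_succ : ∀ (rest : List Int) (cur : Int) (j : Nat),
    j + 1 < rest.length →
    (leftFrom cur rest).getD (j + 1) 0
      = max ((leftFrom cur rest).getD j 0 - 1) (rest.getD (j + 1) 0) := by
  intro rest
  induction rest with
  | nil => intro cur j h; simp at h
  | cons p r ih =>
      intro cur j h
      cases j with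
      | zero =>
          cases r with
          | nil => simp at h
          | cons q r' => simp [leftFrom, List.getD]
      | succ j' =>
          simp only [leftFrom, List.getD_cons_succ]
          exact ih _ j' (by simpa using h)

theorem leftList_getD_succ (prev : List Int) (j : Nat) (h : j + 1 < prev.length) :
    (leftList prev).getD (j + 1) 0
      = max ((leftList prev).getD j 0 - 1) (prev.getD (j + 1) 0) := by
  cases prev with
  | nil => simp at h
  | cons p rest =>
      simp only [leftList, List.drop_one, List.tail_cons, List.getD_cons_zero,
        List.getD_cons_succ]
      cases j with
      | zero =>
          cases rest with
          | nil => simp at h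
          | cons q r' => simp [leftFrom, List.getD]
      | succ j' =>
          exact leftFrom_getD_succ rest p j' (by simpa using h)

theorem leftList_getD (prev : List Int) : ∀ j : Nat, j < prev.length →
    (leftList prev).getD j 0 = myMax (LspecF prev j) := by
  intro j
  induction j with
  | zero =>
      intro h
      cases prev with
      | nil => simp at h
      | cons p rest => simp [leftList, LspecF, List.range_succ, myMax]
  | succ j ih =>
      intro h
      have hj : j < prev.length := by omega
      rw [leftList_getD_succ prev j h, ih hj]
      have hsplit : LspecF prev (j + 1)
          = (LspecF prev j).map (fun x => x - 1) ++ [prev.getD (j + 1) 0] := by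
        simp only [LspecF, List.range_succ (n := j + 1), List.map_append, List.map_map,
          List.map_cons, List.map_nil]
        congr 1
        · apply List.map_congr_left
          intro k _
          simp only [Function.comp_apply]
          push_cast
          ring
        · congr 1
          push_cast
          ring
      rw [hsplit, myMax_append _ _ (by simp [LspecF]) (by simp),
        myMax_map_sub_one _ (LspecF_ne_nil prev j)]
      rfl

-- characterisation of A's right pass: running max of prev[j+k] - k over the suffix
def RmF (prev : List Int) : List Int :=
  (List.range prev.length).map (fun k => prev.getD k 0 - (k : Int))

theorem RmF_cons (p : Int) (rest : List Int) :
    RmF (p :: rest) = p :: (RmF rest).map (fun x => x - 1) := by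
  simp only [RmF, List.length_cons, List.range_succ_eq_map, List.map_cons, List.map_map]
  congr 1
  · simp
  · apply List.map_congr_left
    intro k _
    simp only [Function.comp_apply, List.getD_cons_succ]
    push_cast
    ring

theorem RmF_ne_nil (prev : List Int) (h : prev ≠ []) : RmF prev ≠ [] := by
  cases prev with
  | nil => exact absurd rfl h
  | cons p rest => rw [RmF_cons]; simp

theorem headD_eq_getD (l : List Int) : l.headD 0 = l.getD 0 0 := by
  cases l <;> rfl

theorem rightList_head : ∀ prev : List Int, prev ≠ [] →
    (rightList prev).getD 0 0 = myMax (RmF prev) := by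
  intro prev
  induction prev with
  | nil => intro h; exact absurd rfl h
  | cons p rest ih =>
      intro _
      cases rest with
      | nil => simp [rightList, RmF, List.range_succ, myMax]
      | cons q r' =>
          have hne : (q :: r' : List Int) ≠ [] := by simp
          simp only [rightList, List.getD_cons_zero]
          rw [headD_eq_getD, ih hne, RmF_cons p (q :: r'),
            myMax_cons _ _ (by simp [RmF_cons]),
            myMax_map_sub_one _ (RmF_ne_nil _ hne)]
          exact max_comm _ _

theorem rightList_getD : ∀ (j : Nat) (prev : List Int), j < prev.length →
    (rightList prev).getD j 0 = myMax (RmF (prev.drop j)) := by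
  intro j
  induction j with
  | zero =>
      intro prev h
      have hne : prev ≠ [] := by cases prev <;> simp_all
      simpa using rightList_head prev hne
  | succ j ih =>
      intro prev h
      cases prev with
      | nil => simp at h
      | cons p rest =>
          cases rest with
          | nil => simp at h
          | cons q r' =>
              simp only [rightList, List.getD_cons_succ, List.drop_succ_cons]
              exact ih (q :: r') (by simpa using h)

-- the single inner scan of B, as a list
def innerF (prev : List Int) (n j : Nat) : List Int :=
  (List.range n).map (fun k => prev.getD k 0 - |(j : Int) - (k : Int)|)

theorem getD_drop (l : List Int) (i k : Nat) :
    (l.drop i).getD k 0 = l.getD (i + k) 0 := by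
  simp [List.getD_eq_getElem?_getD, List.getElem?_drop]

theorem combine (prev : List Int) (j : Nat) (h : j < prev.length) :
    myMax (innerF prev prev.length j)
      = max ((leftList prev).getD j 0) ((rightList prev).getD j 0) := by
  have hrange : List.range prev.length
      = List.range (j + 1)
        ++ (List.range (prev.length - (j + 1))).map (fun k => (j + 1) + k) := by
    rw [← List.range_add]
    congr 1
    omega
  have hpart1 : (List.range (j + 1)).map (fun k => prev.getD k 0 - |(j : Int) - (k : Int)|)
      = LspecF prev j := by
    apply List.map_congr_left
    intro k hk
    have hk' : k ≤ j := by simpa [Nat.lt_succ_iff] using hk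
    congr 1
    rw [abs_of_nonneg (by omega)]
  have hRm : RmF (prev.drop j)
      = (prev.getD j 0 - ((0 : Nat) : Int))
          :: (List.range (prev.length - (j + 1))).map
              ((fun k => prev.getD k 0 - |(j : Int) - (k : Int)|) ∘ (fun k => (j + 1) + k)) := by
    simp only [RmF, List.length_drop]
    have hlen : prev.length - j = (prev.length - (j + 1)) + 1 := by omega
    rw [hlen, List.range_succ_eq_map, List.map_cons, List.map_map]
    congr 1
    · rw [getD_drop]; simp
    · apply List.map_congr_left
      intro k _
      simp only [Function.comp_apply, getD_drop]
      have hidx : j + (k + 1) = (j + 1) + k := by omega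
      have habs : |(j : Int) - (((j + 1) + k : Nat) : Int)| = ((k : Int) + 1) := by
        rw [abs_sub_comm, abs_of_nonneg (by push_cast; omega)]
        push_cast; ring
      rw [hidx, habs]
      omega
  have hmem : prev.getD j 0 - ((0 : Nat) : Int) ∈ LspecF prev j := by
    simp only [LspecF, List.mem_map]
    exact ⟨j, by simp, by push_cast; ring_nf⟩
  have hle : prev.getD j 0 - ((0 : Nat) : Int) ≤ myMax (LspecF prev j) :=
    le_myMax_of_mem hmem
  rw [leftList_getD prev j h, rightList_getD j prev h, hRm]
  by_cases hcase : prev.length - (j + 1) = 0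
  · have hLHS : innerF prev prev.length j = LspecF prev j := by
      simp only [innerF]
      rw [hrange, hcase]
      simp only [List.range_zero, List.map_nil, List.append_nil]
      exact hpart1
    rw [hLHS, hcase]
    simp only [List.range_zero, List.map_nil]
    have h1 : myMax [prev.getD j 0 - ((0 : Nat) : Int)] = prev.getD j 0 - ((0 : Nat) : Int) := rfl
    rw [h1]
    exact (max_eq_left hle).symm
  · have hne2 : (List.range (prev.length - (j + 1))).map
        ((fun k => prev.getD k 0 - |(j : Int) - (k : Int)|) ∘ (fun k => (j + 1) + k)) ≠ [] := by
      simp [hcase]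
    have hsplit2 : innerF prev prev.length j
        = LspecF prev j
          ++ (List.range (prev.length - (j + 1))).map
              ((fun k => prev.getD k 0 - |(j : Int) - (k : Int)|) ∘ (fun k => (j + 1) + k)) := by
      simp only [innerF]
      rw [hrange, List.map_append, List.map_map, hpart1]
    rw [hsplit2, myMax_append _ _ (LspecF_ne_nil prev j) hne2, myMax_cons _ _ hne2,
      ← max_assoc, max_eq_left hle]

theorem stepA_eq_stepB (prev row : List Int) :
    stepA prev.length prev row = stepB prev.length prev row := by
  apply List.map_congr_left
  intro j hj
  have hjlt : j < prev.length := List.mem_range.mp hj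
  have hinner : innerBest prev prev.length j = myMax (innerF prev prev.length j) := by
    simp only [innerBest, innerF]
    exact max?_getD_eq_myMax _
  rw [hinner, combine prev j hjlt, Int.add_comm]

theorem fold_eq (n : Nat) : ∀ (rows : List (List Int)) (prev : List Int),
    prev.length = n → rows.foldl (stepA n) prev = rows.foldl (stepB n) prev := by
  intro rows
  induction rows with
  | nil => intro prev _; rfl
  | cons r rest ih =>
      intro prev hlen
      simp only [List.foldl_cons]
      rw [← hlen, stepA_eq_stepB prev r, hlen]
      have h2 : (stepB n prev r).length = n := by simp [stepB]
      exact ih _ h2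

-- ===== VERDICT (by name: the statement is the Claim_ definition above) =====
theorem maxPoints_spec : Claim_equal_maxPoints := by
  intro points _ _
  unfold Spec_maxPoints
  simp only [maxPoints, maxPoints_alt]
  rw [fold_eq _ _ _ rfl]
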